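-- pv_equiv track=rewrite | github.com/machine-intelligence-laboratory/TopicNet | topicnet/cooking_machine/routine.py | get_fix_list
-- ===== SOURCE A (Python) =====
-- def get_fix_string(input_string: str, length: int):
--     """
--     Transforms input_string to the string of the size length.
--
--     Parameters
--     ----------
--     input_string : str
--         input_string
--     length : int
--         length of output_string, if -1 then output_string is the same as input_string
--
--     Returns
--     -------
--     str
--         beautiful string of the size length
--
--     """
--     input_string = str(input_string)
--     if length < 0:
--         output_string = input_string
--     elif len(input_string) > length:
--         sep = (length - 3) // 2
--         if length % 2 == 0:
--             output_string = input_string[:sep + 1] + "..." + input_string[-sep:]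
--         else:
--             output_string = input_string[:sep] + "..." + input_string[-sep:]
--     else:
--         output_string = input_string + " " * (length - len(input_string))
--
--     return output_string
--
-- def get_fix_list(input_list: list, length: int, num: int):
--     """
--     Returns list with strings of size length that contains not more than num strings.
--
--     Parameters
--     ----------
--     input_list : list
--         list of input strings
--     length : int
--         length of output strings
--     num : int
--         maximal number of strings on output list
--
--     Returns
--     -------
--     list
--         list with no more than num of beautiful strings
--
--     """
--     if len(input_list) == 0:
--         input_list = ["---"]
--     output_list = []
--     if (len(input_list) > num) and (num != -1):
--         sep = (num - 1) // 2
--         if num % 2 == 0: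
--             for elem in input_list[:sep + 1]:
--                 output_list.append(get_fix_string(elem, length - 1) + ",")
--             output_list.append("...," + " " * (length - 4))
--             for elem in input_list[-sep:]:
--                 output_list.append(get_fix_string(elem, length - 1) + ",")
--             output_list[-1] = output_list[-1][:-1] + " "
--         else:
--             for elem in input_list[:sep]:
--                 output_list.append(get_fix_string(elem, length - 1) + ",")
--             output_list.append("...," + " " * (length - 4))
--             for elem in input_list[-sep:]:
--                 output_list.append(get_fix_string(elem, length - 1) + ",")
--             output_list[-1] = output_list[-1][:-1] + " "
--     else:
--         for elem in input_list:
--             output_list.append(get_fix_string(elem, length - 1) + ",")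
--         output_list[-1] = output_list[-1][:-1] + " "
--
--     return output_list
-- ===== SOURCE B (Python) =====
-- def get_fix_string(input_string: str, length: int):
--     # same-module helper, used unchanged by both implementations
--     input_string = str(input_string)
--     if length < 0:
--         output_string = input_string
--     elif len(input_string) > length:
--         sep = (length - 3) // 2
--         if length % 2 == 0:
--             output_string = input_string[:sep + 1] + "..." + input_string[-sep:]
--         else:
--             output_string = input_string[:sep] + "..." + input_string[-sep:]
--     else:
--         output_string = input_string + " " * (length - len(input_string))
--     return output_string
--
--
-- def _cut(n, m):
--     # length of xs[:m] (also the start index of xs[m:]) for a list of length n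
--     return min(m, n) if m >= 0 else max(n + m, 0)
--
--
-- def get_fix_list(input_list: list, length: int, num: int):
--     # Index-arithmetic single pass: no slicing, no intermediate lists; each output
--     # row i is computed directly from its source index, the comma fix done inline.
--     items = list(input_list) if input_list else ["---"]
--     n = len(items)
--     truncate = num != -1 and n > num
--     if truncate:
--         sep = (num - 1) // 2
--         h = _cut(n, sep + 1 if num % 2 == 0 else sep)   # number of head rows
--         start = _cut(n, -sep)                           # first tail source index
--         t = n - start                                   # number of tail rows
--         total = h + 1 + t
--     else:
--         h = start = n
--         total = n
--     out = []
--     for i in range(total):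
--         if truncate and i == h:
--             s = "...," + " " * (length - 4)
--         else:
--             src = i if i < h else start + (i - h - 1)
--             s = get_fix_string(items[src], length - 1) + ","
--         if i == total - 1:
--             s = s[:-1] + " "
--         out.append(s)
--     return out
-- ===== Notes on version B (the rewrite author's own statement) =====
-- stated objective: alternative
-- what changed: B replaces A's three duplicated slice-and-append loops and mutation of the last element by closed-form index arithmetic (head count and tail start from one clamp helper) and a single indexed loop that maps each output row directly to its source element, emitting the ellipsis row and applying the last-row comma fix inline; it trades A's slicing/post-mutation for index bookkeeping at the same cost.
import Mathlib
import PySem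

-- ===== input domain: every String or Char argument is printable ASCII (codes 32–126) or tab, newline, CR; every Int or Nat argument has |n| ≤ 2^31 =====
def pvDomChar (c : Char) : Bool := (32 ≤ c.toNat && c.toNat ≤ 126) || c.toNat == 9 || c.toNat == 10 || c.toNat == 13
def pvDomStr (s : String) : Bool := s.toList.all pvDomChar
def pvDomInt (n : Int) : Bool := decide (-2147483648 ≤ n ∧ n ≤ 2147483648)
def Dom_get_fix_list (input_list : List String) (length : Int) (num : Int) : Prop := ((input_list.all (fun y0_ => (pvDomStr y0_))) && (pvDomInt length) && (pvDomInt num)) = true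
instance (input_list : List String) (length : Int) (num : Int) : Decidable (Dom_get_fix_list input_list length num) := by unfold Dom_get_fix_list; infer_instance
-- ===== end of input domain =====

-- B replaces A's three duplicated slice-and-append loops and last-element mutation by closed-form
-- index arithmetic and one indexed pass (objective: alternative); return-value equivalence only.

-- ===== PORT A =====
-- shared-module helper get_fix_string, on List Char (Python str slicing/concat via PySem.List.slice; ' '*k is replicate, k clamped at 0 exactly as Python)
def gfsChars (cs : List Char) (length : Int) : List Char :=
  if length < 0 then cs
  else if (cs.length : Int) > length then
    let sep := PySem.Int.floordiv (length - 3) 2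
    if PySem.Int.mod length 2 = 0 then
      PySem.List.slice cs none (some (sep + 1)) ++ "...".toList ++ PySem.List.slice cs (some (-sep)) none
    else
      PySem.List.slice cs none (some sep) ++ "...".toList ++ PySem.List.slice cs (some (-sep)) none
  else cs ++ List.replicate (length - (cs.length : Int)).toNat ' '

-- get_fix_string(e, length-1) + "," (appears verbatim in both Pythons)
def gflCell (e : String) (length : Int) : String := String.ofList (gfsChars e.toList (length - 1) ++ [','])

-- "...," + " " * (length - 4) (appears verbatim in both Pythons)
def gflEllip (length : Int) : String := String.ofList ("...,".toList ++ List.replicate (length - 4).toNat ' ')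

-- output_list[-1] = output_list[-1][:-1] + " " (A's post-pass; [] unreachable — A's list is never empty)
def gflFixLast : List String → List String
  | [] => []
  | [s] => [String.ofList (s.toList.dropLast ++ [' '])]
  | s :: rest => s :: gflFixLast rest

def get_fix_list (input_list : List String) (length : Int) (num : Int) : List String :=
  let input_list := if input_list.length = 0 then ["---"] else input_list
  if ((input_list.length : Int) > num) ∧ (num ≠ -1) then
    let sep := PySem.Int.floordiv (num - 1) 2
    if PySem.Int.mod num 2 = 0 then
      let o1 := (PySem.List.slice input_list none (some (sep + 1))).foldl
        (fun acc e => acc ++ [gflCell e length]) []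
      let o2 := o1 ++ [gflEllip length]
      let o3 := (PySem.List.slice input_list (some (-sep)) none).foldl
        (fun acc e => acc ++ [gflCell e length]) o2
      gflFixLast o3
    else
      let o1 := (PySem.List.slice input_list none (some sep)).foldl
        (fun acc e => acc ++ [gflCell e length]) []
      let o2 := o1 ++ [gflEllip length]
      let o3 := (PySem.List.slice input_list (some (-sep)) none).foldl
        (fun acc e => acc ++ [gflCell e length]) o2
      gflFixLast o3
  else
    gflFixLast (input_list.foldl (fun acc e => acc ++ [gflCell e length]) [])

-- ===== PORT B =====
-- _cut(n, m): length of xs[:m] (= start index of xs[m:]) for a list of length n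
def gflCut (n : Nat) (m : Int) : Nat := if 0 ≤ m then min m.toNat n else (↑n + m).toNat

def get_fix_list_alt (input_list : List String) (length : Int) (num : Int) : List String :=
  let items := if input_list.isEmpty then ["---"] else input_list
  let n := items.length
  let truncate := num ≠ -1 ∧ (n : Int) > num
  let hst : Nat × Nat × Nat :=  -- (h, start, total)
    if truncate then
      let sep := PySem.Int.floordiv (num - 1) 2
      let h := gflCut n (if PySem.Int.mod num 2 = 0 then sep + 1 else sep)
      let start := gflCut n (-sep)
      (h, start, h + 1 + (n - start))
    else (n, n, n)
  let h := hst.1; let start := hst.2.1; let total := hst.2.2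
  (List.range total).map (fun i =>
    let s :=
      if truncate ∧ i = h then gflEllip length
      else
        let src := if i < h then i else start + (i - h - 1)
        gflCell (items.getD src "") length
    if i = total - 1 then String.ofList (s.toList.dropLast ++ [' ']) else s)

-- ===== PRECONDITION & SPEC =====
def Spec_get_fix_list (input_list : List String) (length : Int) (num : Int) (out : List String) : Prop := out = get_fix_list_alt input_list length num
instance (input_list : List String) (length : Int) (num : Int) (out : List String) : Decidable (Spec_get_fix_list input_list length num out) := by unfold Spec_get_fix_list; infer_instance

-- ===== CLAIM (what is proved, stated in full; the proofs are below) =====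
def Claim_equal_get_fix_list : Prop := ∀ (input_list : List String) (length : Int) (num : Int), Dom_get_fix_list input_list length num → Spec_get_fix_list input_list length num (get_fix_list input_list length num)

-- ===== LEMMAS AND PROOFS =====
theorem gflCut_eq (n : Nat) (m : Int) : gflCut n m = PySem.List.clampIdx n m := by
  unfold gflCut PySem.List.clampIdx; split_ifs <;> omega

theorem gflCut_le (n : Nat) (m : Int) : gflCut n m ≤ n := by
  unfold gflCut; split_ifs <;> omega

theorem slice_none_some {α : Type} (xs : List α) (b : Int) :
    PySem.List.slice xs none (some b) = xs.take (PySem.List.clampIdx xs.length b) := by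
  simp [PySem.List.slice]

theorem fixlast_append (ys : List String) (s : String) :
    gflFixLast (ys ++ [s]) = ys ++ [String.ofList (s.toList.dropLast ++ [' '])] := by
  induction ys with
  | nil => rfl
  | cons a ys ih => cases ys <;> simp_all [gflFixLast]

theorem range_map_fix (L : Nat) (hL : 0 < L) (f : Nat → String) :
    (List.range L).map (fun i => if i = L - 1 then String.ofList ((f i).toList.dropLast ++ [' ']) else f i)
    = gflFixLast ((List.range L).map f) := by
  obtain ⟨K, rfl⟩ : ∃ K, L = K + 1 := ⟨L - 1, (Nat.succ_pred_eq_of_pos hL).symm⟩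
  rw [List.range_succ, List.map_append, List.map_append]
  simp only [List.map_cons, List.map_nil]
  rw [fixlast_append]
  simp only [Nat.add_sub_cancel]
  congr 1
  exact List.map_congr_left (fun i hi => by
    have : i < K := List.mem_range.mp hi
    simp [Nat.ne_of_lt this])

theorem range_map_trunc (xs : List String) (len : Int)
    (h start : Nat) (hh : h ≤ xs.length) (hs : start ≤ xs.length) :
    (List.range (h + 1 + (xs.length - start))).map (fun i =>
      if i = h then gflEllip len
      else gflCell (xs.getD (if i < h then i else start + (i - h - 1)) "") len)
    = (xs.take h).map (fun e => gflCell e len) ++ ([gflEllip len] ++ (xs.drop start).map (fun e => gflCell e len)) := by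
  apply List.ext_getElem
  · simp; omega
  · intro i hi1 hi2
    simp only [List.getElem_map, List.getElem_range]
    by_cases hih : i < h
    · rw [List.getElem_append_left (by simp; omega)]
      simp only [List.getElem_map, List.getElem_take]
      rw [if_neg (by omega), if_pos hih, List.getD_eq_getElem xs "" (by omega)]
    · rw [List.getElem_append_right (by simp; omega)]
      by_cases hieq : i = h
      · subst hieq
        rw [List.getElem_append_left (by simp; omega)]
        simp
      · rw [List.getElem_append_right (by simp; omega), if_neg hieq, if_neg hih]
        simp only [List.getElem_map, List.getElem_drop]
        have hi' : i < h + 1 + (xs.length - start) := by simpa using hi1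
        rw [List.getD_eq_getElem xs "" (by omega)]
        congr 1
        simp [Nat.min_eq_left hh]

theorem map_range_getD (xs : List String) (len : Int) :
    (List.range xs.length).map (fun i => gflCell (xs.getD i "") len) = xs.map (fun e => gflCell e len) := by
  apply List.ext_getElem
  · simp
  · intro i hi1 hi2
    simp only [List.getElem_map, List.getElem_range]
    rw [List.getD_eq_getElem xs "" (by simpa using hi1)]

theorem get_fix_list_eq_alt (input_list : List String) (length num : Int) :
    get_fix_list input_list length num = get_fix_list_alt input_list length num := by
  simp only [get_fix_list, get_fix_list_alt]
  have hitems : (if input_list.isEmpty then ["---"] else input_list)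
      = (if input_list.length = 0 then ["---"] else input_list) := by
    by_cases he : input_list = [] <;> simp [he]
  rw [hitems]
  set items := if input_list.length = 0 then ["---"] else input_list with hdef
  have hne : items ≠ [] := by
    by_cases he : input_list = [] <;> simp [hdef, he]
  have hn : 0 < items.length := List.length_pos_iff.mpr hne
  by_cases htr : num ≠ -1 ∧ (items.length : Int) > num
  · obtain ⟨h1, h2⟩ := htr
    have hcond : (num ≠ -1 ∧ (items.length : Int) > num) = True := by simp [h1, h2]
    have hcond2 : ((items.length : Int) > num ∧ num ≠ -1) = True := by simp [h1, h2]
    simp only [hcond, hcond2, if_true, true_and]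
    set sep := PySem.Int.floordiv (num - 1) 2 with hsep
    by_cases hm : PySem.Int.mod num 2 = 0
    · simp only [if_pos hm]
      set h := gflCut items.length (sep + 1) with hhdef
      set start := gflCut items.length (-sep) with hsdef
      rw [range_map_fix (h + 1 + (items.length - start)) (by omega)
            (fun i => if i = h then gflEllip length
              else gflCell (items.getD (if i < h then i else start + (i - h - 1)) "") length)]
      rw [range_map_trunc items length h start (gflCut_le _ _) (gflCut_le _ _)]
      rw [PySem.List.foldl_append_singleton_eq_map, PySem.List.foldl_append_singleton_eq_map]
      rw [slice_none_some, PySem.List.slice_some_none, ← gflCut_eq, ← gflCut_eq]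
      simp [List.append_assoc]
      rw [hhdef, hsdef]
    · simp only [if_neg hm]
      set h := gflCut items.length sep with hhdef
      set start := gflCut items.length (-sep) with hsdef
      rw [range_map_fix (h + 1 + (items.length - start)) (by omega)
            (fun i => if i = h then gflEllip length
              else gflCell (items.getD (if i < h then i else start + (i - h - 1)) "") length)]
      rw [range_map_trunc items length h start (gflCut_le _ _) (gflCut_le _ _)]
      rw [PySem.List.foldl_append_singleton_eq_map, PySem.List.foldl_append_singleton_eq_map]
      rw [slice_none_some, PySem.List.slice_some_none, ← gflCut_eq, ← gflCut_eq]
      simp [List.append_assoc]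
      rw [hhdef, hsdef]
  · have hcond : (num ≠ -1 ∧ (items.length : Int) > num) = False := by simp [htr]
    have hcond2 : ((items.length : Int) > num ∧ num ≠ -1) = False := by
      simp only [eq_iff_iff, iff_false]; intro hc; exact htr ⟨hc.2, hc.1⟩
    simp only [hcond, hcond2, if_false, false_and]
    rw [List.map_congr_left (fun i hi => by
      have hilt : i < items.length := List.mem_range.mp hi
      simp only [if_pos hilt]
      rfl)]
    rw [range_map_fix items.length hn (fun i => gflCell (items.getD i "") length)]
    rw [map_range_getD]
    rw [PySem.List.foldl_append_singleton_eq_map]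
    simp

-- ===== VERDICT (by name: the statement is the Claim_ definition above) =====
theorem get_fix_list_spec : Claim_equal_get_fix_list := by
  intro input_list length num _
  unfold Spec_get_fix_list
  exact get_fix_list_eq_alt input_list length num
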